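-- pv_equiv track=rewrite | github.com/pujinxiao/Auto_media | app/services/story_llm.py | _merge_usage_totals
-- ===== SOURCE A (Python) =====
-- def _merge_usage_totals(usages: list[dict[str, int] | None]) -> dict[str, int] | None:
--     total = {"prompt_tokens": 0, "completion_tokens": 0}
--     has_usage = False
--     for usage in usages:
--         if usage is None:
--             continue
--         has_usage = True
--         total["prompt_tokens"] += usage.get("prompt_tokens", 0)
--         total["completion_tokens"] += usage.get("completion_tokens", 0)
--     return total if has_usage else None
-- ===== SOURCE B (Python) =====
-- def _merge_usage_totals(usages):
--     n = len(usages)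
--     if n == 0:
--         return None
--     if n == 1:
--         u = usages[0]
--         if u is None:
--             return None
--         return {"prompt_tokens": u.get("prompt_tokens", 0),
--                 "completion_tokens": u.get("completion_tokens", 0)}
--     mid = n // 2
--     left = _merge_usage_totals(usages[:mid])
--     right = _merge_usage_totals(usages[mid:])
--     if left is None:
--         return right
--     if right is None:
--         return left
--     return {"prompt_tokens": left["prompt_tokens"] + right["prompt_tokens"],
--             "completion_tokens": left["completion_tokens"] + right["completion_tokens"]}
-- ===== Notes on version B (the rewrite author's own statement) =====
-- stated objective: alternative
-- what changed: Replaces A's fused left-to-right accumulator loop with a has_usage flag by a divide-and-conquer recursion that halves the list and combines the two halves with an option-monoid merge (None = identity); correct because integer addition is associative.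
import Mathlib
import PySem

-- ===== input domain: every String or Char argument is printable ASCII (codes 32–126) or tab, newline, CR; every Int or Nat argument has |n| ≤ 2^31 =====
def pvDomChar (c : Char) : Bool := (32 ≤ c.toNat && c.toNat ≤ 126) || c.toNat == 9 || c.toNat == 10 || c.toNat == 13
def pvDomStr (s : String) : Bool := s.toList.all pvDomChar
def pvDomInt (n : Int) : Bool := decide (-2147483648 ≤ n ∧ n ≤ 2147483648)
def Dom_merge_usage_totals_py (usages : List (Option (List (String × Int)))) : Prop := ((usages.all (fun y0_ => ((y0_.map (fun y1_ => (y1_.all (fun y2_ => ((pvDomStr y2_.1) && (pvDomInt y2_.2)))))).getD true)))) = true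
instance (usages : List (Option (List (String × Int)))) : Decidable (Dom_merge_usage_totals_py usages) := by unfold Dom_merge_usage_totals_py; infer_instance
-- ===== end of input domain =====

-- B replaces A's fused left-to-right accumulator loop (with a has_usage flag) by a
-- divide-and-conquer recursion that halves the list and combines the two halves with an
-- option-monoid merge (None = identity); objective: alternative (same cost, different algorithm).

-- ===== PORT A =====
-- literal transliteration: total is a dict updated in place, has_usage a flag;
-- the for-body is the helper pvStepA
def pvStepA (st : PySem.Dict String Int × Bool) (u : Option (List (String × Int))) :
    PySem.Dict String Int × Bool :=
  match u with
  | none => st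
  | some usage =>
    let total := st.1.insert "prompt_tokens"
      (st.1.getD "prompt_tokens" 0 + (PySem.Dict.mk usage).getD "prompt_tokens" 0)
    let total := total.insert "completion_tokens"
      (total.getD "completion_tokens" 0 + (PySem.Dict.mk usage).getD "completion_tokens" 0)
    (total, true)

def merge_usage_totals_py (usages : List (Option (List (String × Int)))) : Option (List (String × Int)) :=
  let res := usages.foldl pvStepA (PySem.Dict.mk [("prompt_tokens", 0), ("completion_tokens", 0)], false)
  if res.2 then some res.1.items else none

-- ===== PORT B =====
-- the two final branches of Source B: None is the identity of the merge; in the some/some case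
-- Source B indexes left["prompt_tokens"] / right["prompt_tokens"] directly (both keys are always
-- present in any dict Source B returns, so the lookup never raises; ported as get? with default)
def pvMergeTwo (l r : Option (List (String × Int))) : Option (List (String × Int)) :=
  match l, r with
  | none, r => r
  | some l, none => some l
  | some l, some r => some
      [("prompt_tokens", ((PySem.Dict.mk l).get? "prompt_tokens").getD 0
          + ((PySem.Dict.mk r).get? "prompt_tokens").getD 0),
       ("completion_tokens", ((PySem.Dict.mk l).get? "completion_tokens").getD 0
          + ((PySem.Dict.mk r).get? "completion_tokens").getD 0)]

-- usages[:mid] / usages[mid:] with 0 ≤ mid ≤ len are exactly List.take / List.drop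
def merge_usage_totals_py_alt : List (Option (List (String × Int))) → Option (List (String × Int))
  | [] => none
  | [u] =>
    match u with
    | none => none
    | some usage => some
        [("prompt_tokens", (PySem.Dict.mk usage).getD "prompt_tokens" 0),
         ("completion_tokens", (PySem.Dict.mk usage).getD "completion_tokens" 0)]
  | u :: v :: rest =>
    pvMergeTwo
      (merge_usage_totals_py_alt ((u :: v :: rest).take ((u :: v :: rest).length / 2)))
      (merge_usage_totals_py_alt ((u :: v :: rest).drop ((u :: v :: rest).length / 2)))
termination_by l => l.length
decreasing_by
  · simp; omega
  · simp; omega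

-- ===== PRECONDITION & SPEC =====
def Spec_merge_usage_totals_py (usages : List (Option (List (String × Int)))) (out : Option (List (String × Int))) : Prop := out = merge_usage_totals_py_alt usages
instance (usages : List (Option (List (String × Int)))) (out : Option (List (String × Int))) : Decidable (Spec_merge_usage_totals_py usages out) := by unfold Spec_merge_usage_totals_py; infer_instance

-- ===== CLAIM (what is proved, stated in full; the proofs are below) =====
def Claim_equal_merge_usage_totals_py : Prop := ∀ (usages : List (Option (List (String × Int)))), Dom_merge_usage_totals_py usages → Spec_merge_usage_totals_py usages (merge_usage_totals_py usages)

-- ===== LEMMAS AND PROOFS =====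

-- the common characterisation both ports are reduced to
def pvSumP (l : List (Option (List (String × Int)))) : Int :=
  ((l.filterMap id).map (fun u => (PySem.Dict.mk u).getD "prompt_tokens" 0)).sum
def pvSumC (l : List (Option (List (String × Int)))) : Int :=
  ((l.filterMap id).map (fun u => (PySem.Dict.mk u).getD "completion_tokens" 0)).sum
def pvSpec (l : List (Option (List (String × Int)))) : Option (List (String × Int)) :=
  if l.filterMap id = [] then none
  else some [("prompt_tokens", pvSumP l), ("completion_tokens", pvSumC l)]

lemma pvEx (l : List (Option (List (String × Int)))) (h : ¬ l.filterMap id = []) :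
    ∃ x ∈ l, ¬ x = none := by
  simpa [List.filterMap_eq_nil_iff, not_forall] using h

lemma pvMergeTwo_spec (t d : List (Option (List (String × Int)))) :
    pvMergeTwo (pvSpec t) (pvSpec d) = pvSpec (t ++ d) := by
  unfold pvSpec pvSumP pvSumC
  rw [List.filterMap_append]
  by_cases ht : t.filterMap id = [] <;> by_cases hd : d.filterMap id = []
  · rw [if_pos ht, if_pos hd, ht, hd]; simp [pvMergeTwo]
  · rw [if_pos ht, if_neg hd, ht]
    simp [pvMergeTwo]
    exact pvEx d hd
  · rw [if_neg ht, if_pos hd, hd]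
    simp [pvMergeTwo]
    exact pvEx t ht
  · rw [if_neg ht, if_neg hd,
      if_neg (fun h => ht (List.append_eq_nil_iff.mp h).1)]
    simp [pvMergeTwo, PySem.Dict.get?]

lemma pvAlt_char (l : List (Option (List (String × Int)))) :
    merge_usage_totals_py_alt l = pvSpec l := by
  fun_induction merge_usage_totals_py_alt l with
  | case1 => simp [pvSpec]
  | case2 => simp [pvSpec]
  | case3 usage => simp [pvSpec, pvSumP, pvSumC]
  | case4 u v rest ih1 ih2 =>
    rw [ih1, ih2, pvMergeTwo_spec, List.take_append_drop]

lemma pvStepA_shape (p c : Int) (b : Bool) (usage : List (String × Int)) :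
    pvStepA (PySem.Dict.mk [("prompt_tokens", p), ("completion_tokens", c)], b) (some usage)
      = (PySem.Dict.mk [("prompt_tokens", p + (PySem.Dict.mk usage).getD "prompt_tokens" 0),
          ("completion_tokens", c + (PySem.Dict.mk usage).getD "completion_tokens" 0)], true) := by
  simp [pvStepA, PySem.Dict.insert, PySem.Dict.getD, PySem.Dict.get?, PySem.Dict.contains]

lemma pvLoopA (l : List (Option (List (String × Int)))) (p c : Int) :
    l.foldl pvStepA (PySem.Dict.mk [("prompt_tokens", p), ("completion_tokens", c)], true)
      = (PySem.Dict.mk [("prompt_tokens", p + pvSumP l), ("completion_tokens", c + pvSumC l)], true) := by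
  induction l generalizing p c with
  | nil => simp [pvSumP, pvSumC]
  | cons u l ih =>
    cases u with
    | none => simpa [pvSumP, pvSumC] using ih p c
    | some usage =>
      simp only [List.foldl_cons, pvStepA_shape, ih, pvSumP, pvSumC, List.filterMap_cons, id,
        List.map_cons, List.sum_cons, add_assoc]

lemma pvA_char (usages : List (Option (List (String × Int)))) :
    merge_usage_totals_py usages = pvSpec usages := by
  induction usages with
  | nil => rfl
  | cons u l ih =>
    cases u with
    | none =>
      simp only [merge_usage_totals_py] at ih ⊢
      simpa [pvStepA, pvSpec, pvSumP, pvSumC] using ih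
    | some usage =>
      simp only [merge_usage_totals_py, List.foldl_cons, pvStepA_shape, pvLoopA]
      simp [pvSpec, pvSumP, pvSumC]

-- ===== VERDICT (by name: the statement is the Claim_ definition above) =====
theorem merge_usage_totals_py_spec : Claim_equal_merge_usage_totals_py := by
  intro usages _
  unfold Spec_merge_usage_totals_py
  rw [pvA_char, pvAlt_char]
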